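-- pv_equiv track=rewrite | github.com/symbolfarm/specsoloist | build/quine/src/specsoloist/build_diff.py | _strip_python_comments
-- ===== SOURCE A (Python) =====
-- def _strip_python_comments(text: str) -> str:
--     """Strip # comments from Python source (fallback when AST parsing fails)."""
--     lines = text.split('\n')
--     result = []
--     for line in lines:
--         # Remove inline comments
--         if '#' in line:
--             # Be careful with strings
--             in_string = False
--             string_char = None
--             for i, char in enumerate(line):
--                 if char in ('"', "'") and (i == 0 or line[i - 1] != '\\'):
--                     if not in_string:
--                         in_string = True
--                         string_char = char
--                     elif char == string_char:
--                         in_string = False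
--                         string_char = None
--                 if char == '#' and not in_string:
--                     line = line[:i].rstrip()
--                     break
--         result.append(line)
--
--     # Strip trailing whitespace and normalize multiple blank lines
--     result = [line.rstrip() for line in result]
--
--     return '\n'.join(result)
-- ===== SOURCE B (Python) =====
-- def _strip_python_comments(text: str) -> str:
--     """Strip # comments in one pass over the text (no split into lines)."""
--     out = []
--     cur = []
--     in_string = False
--     string_char = None
--     prev = None
--     skipping = False
--     for ch in text:
--         if ch == '\n':
--             out.append(''.join(cur).rstrip())
--             cur = []
--             in_string = False
--             string_char = None
--             prev = None
--             skipping = False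
--         elif skipping:
--             prev = ch
--         else:
--             if ch in ('"', "'") and prev != '\\':
--                 if not in_string:
--                     in_string = True
--                     string_char = ch
--                 elif ch == string_char:
--                     in_string = False
--                     string_char = None
--             if ch == '#' and not in_string:
--                 skipping = True
--             else:
--                 cur.append(ch)
--             prev = ch
--     out.append(''.join(cur).rstrip())
--     return '\n'.join(out)
-- ===== Notes on version B (the rewrite author's own statement) =====
-- stated objective: alternative
-- what changed: B replaces A's split-into-lines with nested per-line rescans ('#' membership test, then an indexed scan using line[i-1]) by a single character-level state machine over the whole text that carries the line buffer, string state, previous char and a skip flag, emitting rstripped lines at each newline.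
import Mathlib
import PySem

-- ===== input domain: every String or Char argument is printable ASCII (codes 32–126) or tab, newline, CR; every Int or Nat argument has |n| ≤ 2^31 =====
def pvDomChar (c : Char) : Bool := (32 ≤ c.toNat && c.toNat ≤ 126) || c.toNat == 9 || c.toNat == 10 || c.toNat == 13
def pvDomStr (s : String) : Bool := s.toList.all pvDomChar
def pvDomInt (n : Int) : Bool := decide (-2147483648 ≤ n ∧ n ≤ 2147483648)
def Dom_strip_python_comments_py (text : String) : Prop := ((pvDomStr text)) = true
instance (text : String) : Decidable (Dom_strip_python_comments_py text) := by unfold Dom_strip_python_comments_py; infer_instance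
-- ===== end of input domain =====

-- B is an alternative single-pass state machine over the whole text (A splits into lines and rescans each line); same values, similar cost.

-- ===== PORT A =====
-- inner 'for i, char in enumerate(line)' loop of A; `ln` is the (unchanged) line being scanned,
-- reassignment-then-break is ported as returning the cut line. line[i-1] (reached only with i ≥ 1,
-- so always in range) is PySem.List.pyGetD; line[:i] with i ≥ 0 is List.take (exact here).
def lineScanA (ln : List Char) : List Char → Nat → Bool → Option Char → List Char
  | [], _, _, _ => ln
  | c :: cs, i, inStr, sc =>
    let q : Bool × Option Char :=
      if (c = '"' ∨ c = '\'') ∧ (i = 0 ∨ PySem.List.pyGetD ln ((i : Int) - 1) ' ' ≠ '\\') then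
        if ¬ inStr then (true, some c)
        else if some c = sc then (false, none)
        else (inStr, sc)
      else (inStr, sc)
    if c = '#' ∧ ¬ q.1 then PySem.Chars.rstrip (ln.take i)
    else lineScanA ln cs (i + 1) q.1 q.2

def lineA (line : List Char) : List Char :=
  if PySem.Chars.isIn ['#'] line then lineScanA line line 0 false none else line

def strip_python_comments_py (text : String) : String :=
  let lines := PySem.Chars.splitOn text.toList ['\n']
  let result := lines.map lineA
  let result2 := result.map PySem.Chars.rstrip
  String.ofList (PySem.Chars.join ['\n'] result2)

-- ===== PORT B =====
-- single pass over all characters: (out, cur, in_string, string_char, prev, skipping)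
def goB : List Char → List (List Char) → List Char → Bool → Option Char → Option Char → Bool → List (List Char)
  | [], out, cur, _, _, _, _ => out ++ [PySem.Chars.rstrip cur]
  | c :: cs, out, cur, inStr, sc, prev, skip =>
    if c = '\n' then goB cs (out ++ [PySem.Chars.rstrip cur]) [] false none none false
    else if skip then goB cs out cur inStr sc (some c) true
    else
      let q : Bool × Option Char :=
        if (c = '"' ∨ c = '\'') ∧ prev ≠ some '\\' then
          if ¬ inStr then (true, some c)
          else if some c = sc then (false, none)
          else (inStr, sc)
        else (inStr, sc)
      if c = '#' ∧ ¬ q.1 then goB cs out cur q.1 q.2 (some c) true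
      else goB cs out (cur ++ [c]) q.1 q.2 (some c) false

def strip_python_comments_py_alt (text : String) : String :=
  String.ofList (PySem.Chars.join ['\n'] (goB text.toList [] [] false none none false))

-- ===== PRECONDITION & SPEC =====
def Spec_strip_python_comments_py (text : String) (out : String) : Prop := out = strip_python_comments_py_alt text
instance (text : String) (out : String) : Decidable (Spec_strip_python_comments_py text out) := by unfold Spec_strip_python_comments_py; infer_instance

-- ===== CLAIM (what is proved, stated in full; the proofs are below) =====
def Claim_equal_strip_python_comments_py : Prop := ∀ (text : String), Dom_strip_python_comments_py text → Spec_strip_python_comments_py text (strip_python_comments_py text)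

-- ===== LEMMAS AND PROOFS =====

-- per-line mirror of goB's non-newline branches (proof helper only)
def lineGoB : List Char → List Char → Bool → Option Char → Option Char → Bool → List Char
  | [], cur, _, _, _, _ => cur
  | c :: cs, cur, inStr, sc, prev, skip =>
    if skip then lineGoB cs cur inStr sc (some c) true
    else
      let q : Bool × Option Char :=
        if (c = '"' ∨ c = '\'') ∧ prev ≠ some '\\' then
          if ¬ inStr then (true, some c)
          else if some c = sc then (false, none)
          else (inStr, sc)
        else (inStr, sc)
      if c = '#' ∧ ¬ q.1 then lineGoB cs cur q.1 q.2 (some c) true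
      else lineGoB cs (cur ++ [c]) q.1 q.2 (some c) false

-- split on '\n' as (first line, remaining lines)
def splitNl : List Char → List Char × List (List Char)
  | [] => ([], [])
  | c :: cs =>
    let p := splitNl cs
    if c = '\n' then ([], p.1 :: p.2) else (c :: p.1, p.2)

def procB (l : List Char) : List Char := PySem.Chars.rstrip (lineGoB l [] false none none false)

theorem rstrip_idem (l : List Char) : PySem.Chars.rstrip (PySem.Chars.rstrip l) = PySem.Chars.rstrip l := by
  simp [PySem.Chars.rstrip, List.dropWhile_idempotent]

theorem lineGoB_skip (cs : List Char) : ∀ cur inStr sc prev, lineGoB cs cur inStr sc prev true = cur := by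
  induction cs with
  | nil => intro cur inStr sc prev; rfl
  | cons c cs ih => intro cur inStr sc prev; simp [lineGoB, ih]

theorem lineScanA_nohash (cs : List Char) : ∀ ln i inStr sc, '#' ∉ cs → lineScanA ln cs i inStr sc = ln := by
  induction cs with
  | nil => intro ln i inStr sc _; rfl
  | cons c cs ih =>
    intro ln i inStr sc h
    simp only [List.mem_cons, not_or] at h
    simp [lineScanA, Ne.symm h.1, ih ln (i+1) _ _ h.2]

theorem pyGetD_append_last (pre rest : List Char) (h : pre ≠ []) :
    PySem.List.pyGetD (pre ++ rest) ((pre.length : Int) - 1) ' ' = pre.getLast h := by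
  have h1 : 0 < pre.length := List.length_pos_iff.mpr h
  have : ((pre.length : Int) - 1) = ((pre.length - 1 : Nat) : Int) := by omega
  rw [this, PySem.List.pyGetD_natCast]
  rw [List.getD_eq_getElem?_getD, List.getElem?_append_left (by omega)]
  rw [List.getLast_eq_getElem]
  simp [List.getElem?_eq_getElem (by omega : pre.length - 1 < pre.length)]

-- the two escape conditions agree under the invariant prev = pre.getLast?
theorem cond_equiv (pre rest : List Char) :
    ((pre.length = 0 ∨ PySem.List.pyGetD (pre ++ rest) ((pre.length : Int) - 1) ' ' ≠ '\\')
      ↔ pre.getLast? ≠ some '\\') := by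
  rcases eq_or_ne pre [] with rfl | h
  · simp
  · rw [pyGetD_append_last pre rest h]
    have h1 : 0 < pre.length := List.length_pos_iff.mpr h
    rw [List.getLast?_eq_some_getLast h]
    constructor
    · rintro (h0 | hne)
      · omega
      · simp [hne]
    · intro hne; right; intro e; exact hne (by simp [e])

theorem scan_eq (cs : List Char) : ∀ pre inStr sc,
    PySem.Chars.rstrip (lineGoB cs pre inStr sc pre.getLast? false)
      = PySem.Chars.rstrip (lineScanA (pre ++ cs) cs pre.length inStr sc) := by
  induction cs with
  | nil => intro pre inStr sc; simp [lineGoB, lineScanA]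
  | cons c cs ih =>
    intro pre inStr sc
    simp only [lineGoB, lineScanA, Bool.false_eq_true, if_false]
    have hcond : (pre.length = 0 ∨ PySem.List.pyGetD (pre ++ c :: cs) ((pre.length : Int) - 1) ' ' ≠ '\\')
        ↔ (pre.getLast? ≠ some '\\') := cond_equiv pre (c :: cs)
    simp only [hcond]
    generalize (if (c = '"' ∨ c = '\'') ∧ pre.getLast? ≠ some '\\' then
        if ¬inStr = true then (true, some c) else if some c = sc then (false, none) else (inStr, sc)
      else (inStr, sc)) = q
    by_cases h2 : c = '#' ∧ ¬ q.1 = true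
    · rw [if_pos h2, if_pos h2, lineGoB_skip, List.take_left, rstrip_idem]
    · rw [if_neg h2, if_neg h2]
      have h3 := ih (pre ++ [c]) q.1 q.2
      simp only [List.getLast?_concat, List.append_assoc, List.cons_append, List.nil_append,
        List.length_append, List.length_cons, List.length_nil, Nat.zero_add] at h3
      exact h3

theorem procB_eq (l : List Char) : procB l = PySem.Chars.rstrip (lineA l) := by
  have h0 := scan_eq l [] false none
  simp only [List.nil_append, List.length_nil, List.getLast?_nil] at h0
  unfold procB lineA
  by_cases hin : PySem.Chars.isIn ['#'] l = true
  · rw [if_pos hin]; exact h0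
  · rw [if_neg hin]
    have hm : '#' ∉ l := by
      have := (PySem.Chars.isIn_eq_false_iff ['#'] l).mp (by simpa using hin)
      exact fun hmem => this ((List.singleton_infix_iff '#' l).mpr hmem)
    rw [h0, lineScanA_nohash l l 0 false none hm]

theorem goB_eq (cs : List Char) : ∀ out cur inStr sc prev skip,
    goB cs out cur inStr sc prev skip
      = out ++ PySem.Chars.rstrip (lineGoB (splitNl cs).1 cur inStr sc prev skip)
          :: ((splitNl cs).2).map procB := by
  induction cs with
  | nil => intro out cur inStr sc prev skip; simp [goB, lineGoB, splitNl]
  | cons c cs ih =>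
    intro out cur inStr sc prev skip
    by_cases hc : c = '\n'
    · subst hc
      simp only [goB, splitNl, ih]
      simp [procB, lineGoB, List.append_assoc]
    · simp only [goB, lineGoB, splitNl, if_neg hc]
      cases skip
      · simp only [Bool.false_eq_true, if_false]
        generalize (if (c = '"' ∨ c = '\'') ∧ prev ≠ some '\\' then
            if ¬inStr = true then (true, some c) else if some c = sc then (false, none) else (inStr, sc)
          else (inStr, sc)) = q
        by_cases h2 : c = '#' ∧ ¬ q.1 = true
        · rw [if_pos h2, if_pos h2, ih]
        · rw [if_neg h2, if_neg h2, ih]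
      · simp [ih]

theorem splitOn_go_eq (l : List Char) : ∀ (fuel : Nat) (cur : List Char) (acc : List (List Char)),
    l.length ≤ fuel →
    PySem.Chars.splitOn.go ['\n'] fuel l cur acc
      = acc.reverse ++ (cur.reverse ++ (splitNl l).1) :: (splitNl l).2 := by
  induction l with
  | nil =>
    intro fuel cur acc _
    cases fuel <;> simp [PySem.Chars.splitOn.go, splitNl]
  | cons c rest ih =>
    intro fuel cur acc hf
    cases fuel with
    | zero => simp at hf
    | succ f =>
      by_cases hc : c = '\n'
      · subst hc
        rw [PySem.Chars.splitOn.go]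
        rw [if_pos (by simp [List.isPrefixOf])]
        have hd : List.drop (['\n'].length) ('\n' :: rest) = rest := by simp
        rw [hd, ih f [] (cur.reverse :: acc) (by simpa using Nat.le_of_succ_le_succ hf)]
        simp [splitNl]
      · rw [PySem.Chars.splitOn.go]
        rw [if_neg (by simp [List.isPrefixOf, Ne.symm hc])]
        rw [ih f (c :: cur) acc (by simpa using Nat.le_of_succ_le_succ hf)]
        simp [splitNl, hc]

theorem splitOn_eq (cs : List Char) :
    PySem.Chars.splitOn cs ['\n'] = (splitNl cs).1 :: (splitNl cs).2 := by
  unfold PySem.Chars.splitOn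
  rw [splitOn_go_eq cs (cs.length + 1) [] [] (by omega)]
  simp

-- ===== VERDICT (by name: the statement is the Claim_ definition above) =====
theorem strip_python_comments_py_spec : Claim_equal_strip_python_comments_py := by
  intro text _
  unfold Spec_strip_python_comments_py strip_python_comments_py strip_python_comments_py_alt
  rw [splitOn_eq, goB_eq]
  simp only [List.nil_append, List.map_cons, List.map_map]
  have hh := procB_eq (splitNl text.toList).1
  unfold procB at hh
  rw [← hh]
  have ht : List.map (PySem.Chars.rstrip ∘ lineA) (splitNl text.toList).2
      = List.map procB (splitNl text.toList).2 :=
    List.map_congr_left fun l _ => by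
      simp only [Function.comp_apply]; exact (procB_eq l).symm
  rw [ht]
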